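-- pv_equiv track=rewrite | github.com/jameszheng1990/LabRad_Strontium_A | sequencer/devices/yesr_sequencer_board/device.py | match_sequence_key
-- ===== SOURCE A (Python) =====
-- def match_sequence_key(channel_sequences, channel_key):
--     channel_nameloc = channel_key.split('@') + ['']
--     channel_name = channel_nameloc[0]
--     channel_loc = channel_nameloc[1]
--
--     for sequence_key, sequence in channel_sequences.items():
--         sequence_nameloc = sequence_key.split('@') + ['']
--         if sequence_nameloc == channel_nameloc:
--             return sequence_key
--
--     for sequence_key, sequence in channel_sequences.items():
--         sequence_name = (sequence_key.split('@') + [''])[0]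
--         if sequence_name == channel_name:
--             return sequence_key
--
--     for sequence_key, sequence in channel_sequences.items():
--         sequence_loc = (sequence_key.split('@') + [''])[1]
--         if sequence_loc == channel_loc:
--             return sequence_key
-- ===== SOURCE B (Python) =====
-- def match_sequence_key(channel_sequences, channel_key):
--     target = channel_key.split('@') + ['']
--     name = target[0]
--     loc = target[1]
--     name_cand = None
--     loc_cand = None
--     for key in channel_sequences:
--         parts = key.split('@') + ['']
--         if parts == target:
--             return key
--         if name_cand is None and parts[0] == name:
--             name_cand = key
--         if loc_cand is None and parts[1] == loc:
--             loc_cand = key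
--     return name_cand if name_cand is not None else loc_cand
-- ===== Notes on version B (the rewrite author's own statement) =====
-- stated objective: alternative
-- what changed: Replaced A's three full passes over the dict (exact tier, then name tier, then loc tier) with a single pass that returns immediately on an exact match and records the first name-only and first loc-only candidates, choosing between them after the loop.
import Mathlib
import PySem

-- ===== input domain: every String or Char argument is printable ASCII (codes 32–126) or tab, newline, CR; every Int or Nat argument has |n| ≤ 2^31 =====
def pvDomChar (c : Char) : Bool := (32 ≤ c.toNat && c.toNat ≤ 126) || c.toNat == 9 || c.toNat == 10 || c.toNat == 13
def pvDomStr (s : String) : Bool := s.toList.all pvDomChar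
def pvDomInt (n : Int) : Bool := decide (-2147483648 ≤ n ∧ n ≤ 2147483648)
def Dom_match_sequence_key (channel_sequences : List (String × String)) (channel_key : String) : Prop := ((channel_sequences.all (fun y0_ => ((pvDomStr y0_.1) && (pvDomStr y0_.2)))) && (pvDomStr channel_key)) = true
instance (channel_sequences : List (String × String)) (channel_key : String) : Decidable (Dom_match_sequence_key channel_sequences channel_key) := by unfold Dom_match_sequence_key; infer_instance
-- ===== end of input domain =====

-- B replaces A's three sequential scans of the dict by a single scan keeping first-match
-- candidates per tier; equivalence of the two traversal strategies is proved below.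

-- ===== PORT A =====
-- key.split('@') + ['']  (the separator "@" is nonempty, so split? is always some and the getD [] default is dead)
def mskSplit (k : String) : List String := (PySem.Str.split? k "@").getD [] ++ [""]

-- lst[0] / lst[1]; exact here: both ports only apply these to split results with the
-- appended "", which have length ≥ 2, so pyGet? is always some and the default is dead.
def msk0 (xs : List String) : String := (PySem.List.pyGet? xs 0).getD ""
def msk1 (xs : List String) : String := (PySem.List.pyGet? xs 1).getD ""

-- first for-loop of A: first key whose full split list equals channel_nameloc
def mskExact (l : List (String × String)) (target : List String) : Option String :=
  match l with
  | [] => none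
  | (k, _) :: t => if mskSplit k = target then some k else mskExact t target

-- second for-loop of A: first key whose name part matches
def mskName (l : List (String × String)) (name : String) : Option String :=
  match l with
  | [] => none
  | (k, _) :: t => if msk0 (mskSplit k) = name then some k else mskName t name

-- third for-loop of A: first key whose loc part matches
def mskLoc (l : List (String × String)) (loc : String) : Option String :=
  match l with
  | [] => none
  | (k, _) :: t => if msk1 (mskSplit k) = loc then some k else mskLoc t loc

def match_sequence_key (channel_sequences : List (String × String)) (channel_key : String) : Option String :=
  let channel_nameloc := mskSplit channel_key
  let channel_name := msk0 channel_nameloc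
  let channel_loc := msk1 channel_nameloc
  match mskExact channel_sequences channel_nameloc with
  | some k => some k
  | none =>
    match mskName channel_sequences channel_name with
    | some k => some k
    | none => mskLoc channel_sequences channel_loc

-- ===== PORT B =====
-- the single for-loop of B, carrying the two first-match candidates
def mskLoop (l : List (String × String)) (target : List String) (name loc : String)
    (nameCand locCand : Option String) : Option String :=
  match l with
  | [] => match nameCand with
          | some k => some k
          | none => locCand
  | (k, _) :: t =>
    let parts := mskSplit k
    if parts = target then some k
    else
      mskLoop t target name loc
        (if nameCand = none ∧ msk0 parts = name then some k else nameCand)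
        (if locCand = none ∧ msk1 parts = loc then some k else locCand)

def match_sequence_key_alt (channel_sequences : List (String × String)) (channel_key : String) : Option String :=
  let target := mskSplit channel_key
  mskLoop channel_sequences target (msk0 target) (msk1 target) none none

-- ===== PRECONDITION & SPEC =====
def Spec_match_sequence_key (channel_sequences : List (String × String)) (channel_key : String) (out : Option String) : Prop := out = match_sequence_key_alt channel_sequences channel_key
instance (channel_sequences : List (String × String)) (channel_key : String) (out : Option String) : Decidable (Spec_match_sequence_key channel_sequences channel_key out) := by unfold Spec_match_sequence_key; infer_instance

-- ===== CLAIM (what is proved, stated in full; the proofs are below) =====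
def Claim_equal_match_sequence_key : Prop := ∀ (channel_sequences : List (String × String)) (channel_key : String), Dom_match_sequence_key channel_sequences channel_key → Spec_match_sequence_key channel_sequences channel_key (match_sequence_key channel_sequences channel_key)

-- ===== LEMMAS AND PROOFS =====

-- loop invariant: B's single pass equals A's three-pass combination, for any
-- pending candidates nc, lc
theorem mskLoop_eq (l : List (String × String)) (target : List String) (name loc : String)
    (nc lc : Option String) :
    mskLoop l target name loc nc lc =
      match mskExact l target with
      | some k => some k
      | none => (nc.or (mskName l name)).or (lc.or (mskLoc l loc)) := by
  induction l generalizing nc lc with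
  | nil => cases nc <;> cases lc <;> simp [mskLoop, mskExact, mskName, mskLoc, Option.or]
  | cons h t ih =>
    obtain ⟨k, v⟩ := h
    simp only [mskLoop, mskExact, mskName, mskLoc]
    by_cases he : mskSplit k = target
    · simp [he]
    · simp only [he, if_false]
      rw [ih]
      cases hx : mskExact t target with
      | some a => simp
      | none =>
        simp only []
        congr 1
        · cases nc <;> by_cases hn : msk0 (mskSplit k) = name <;>
            simp [hn, Option.or]
        · cases lc <;> by_cases hl : msk1 (mskSplit k) = loc <;>
            simp [hl, Option.or]

-- ===== VERDICT (by name: the statement is the Claim_ definition above) =====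
theorem match_sequence_key_spec : Claim_equal_match_sequence_key := by
  intro cs ck _
  unfold Spec_match_sequence_key match_sequence_key match_sequence_key_alt
  rw [mskLoop_eq]
  cases hx : mskExact cs (mskSplit ck) with
  | some a => simp [hx]
  | none =>
    simp only [hx]
    cases mskName cs (msk0 (mskSplit ck)) <;> simp [Option.or]
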